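-- pv_equiv track=rewrite | github.com/khl6235/AlgorithmStudy | src/PythonAlgo/2021_Mar/0309_2.py | solution
-- ===== SOURCE A (Python) =====
-- def solution(s):
--     length = len(s)
--     answer = [0, 0]
--     while length > 1:
--         answer[0] += 1
--         s = s.replace("0", "")
--         answer[1] += length - len(s)
--         s = binary(len(s))
--         length = len(s)
--
--     return answer
--
-- def binary(n):
--     res = ""
--     while n > 1:
--         res += str(n%2)
--         n = n//2
--     if n == 1:
--         res += "1"
--
--     return res
-- ===== SOURCE B (Python) =====
-- def _solve(n):
--     # (steps, zeros removed) for the game played on the binary representation of n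
--     if n.bit_length() <= 1:
--         return (0, 0)
--     steps, zeros = _solve(bin(n).count("1"))
--     return (steps + 1, zeros + n.bit_length() - bin(n).count("1"))
--
-- def solution(s):
--     length = len(s)
--     ones = length - s.count("0")
--     if length <= 1:
--         return [0, 0]
--     steps, zeros = _solve(ones)
--     return [steps + 1, zeros + length - ones]
-- ===== Notes on version B (the rewrite author's own statement) =====
-- stated objective: alternative
-- what changed: B peels the first round into a count of characters other than the zero digit and then computes the rest by structural recursion on an integer (bit_length/popcount), with no loop, no string rebuilding and no hand-written binary() helper.
import Mathlib
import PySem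

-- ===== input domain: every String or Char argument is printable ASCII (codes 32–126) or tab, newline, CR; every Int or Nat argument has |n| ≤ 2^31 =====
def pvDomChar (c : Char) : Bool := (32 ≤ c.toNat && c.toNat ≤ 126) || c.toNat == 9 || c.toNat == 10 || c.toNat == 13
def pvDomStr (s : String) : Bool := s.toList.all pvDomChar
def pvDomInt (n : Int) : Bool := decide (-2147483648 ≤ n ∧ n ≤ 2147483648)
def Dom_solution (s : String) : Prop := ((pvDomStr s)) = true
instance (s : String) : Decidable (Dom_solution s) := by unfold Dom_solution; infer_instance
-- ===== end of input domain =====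

-- B replaces A's while-loop of string rebuilding (replace + hand-written binary()) by
-- one count of the characters other than the zero digit and a recursion on an integer via bit_length/popcount;
-- equivalence of return values.

-- ===== PORT A =====

-- A's helper binary(n): n is always a string length here, hence nonnegative, so Nat
-- '%'/'/' coincide exactly with Python's '%'/'//'. The accumulator 'res += str(n%2)'
-- is rendered as the structurally identical head-append recursion (same list).
def binaryA (n : Nat) : List Char :=
  if 1 < n then (PySem.Int.toStr ((n % 2 : Nat) : Int)).toList ++ binaryA (n / 2)
  else if n = 1 then ['1'] else []

-- lemmas the port of A needs for its termination argument (cited in decreasing_by)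
theorem replace_go_nil (fuel : Nat) (acc : List Char) :
    PySem.Chars.replace.go ['0'] [] fuel [] acc = acc.reverse := by
  cases fuel
  · rw [PySem.Chars.replace.go]; simp
  · rw [PySem.Chars.replace.go]; simp

theorem replace_go_cons (fuel : Nat) (c : Char) (t acc : List Char) :
    PySem.Chars.replace.go ['0'] [] (fuel+1) (c :: t) acc
      = if '0' = c then PySem.Chars.replace.go ['0'] [] fuel t acc
        else PySem.Chars.replace.go ['0'] [] fuel t (c :: acc) := by
  rw [PySem.Chars.replace.go]
  by_cases hc : '0' = c <;> simp [List.isPrefixOf, hc]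

theorem replace_go_spec (fuel : Nat) : ∀ (l acc : List Char), l.length ≤ fuel →
    PySem.Chars.replace.go ['0'] [] fuel l acc
      = acc.reverse ++ l.filter (fun c => c != '0') := by
  induction fuel with
  | zero =>
    intro l acc h
    have hl : l = [] := List.length_eq_zero_iff.mp (by omega)
    subst hl
    simp [replace_go_nil]
  | succ fuel ih =>
    intro l acc h
    cases l with
    | nil => simp [replace_go_nil]
    | cons c t =>
      rw [replace_go_cons]
      by_cases hc : '0' = c
      · rw [if_pos hc, ih t acc (by simpa using h)]
        simp [← hc]
      · rw [if_neg hc, ih t (c :: acc) (by simpa using h)]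
        have hne : (c != '0') = true := by simpa using fun h => hc h.symm
        simp [hne]

theorem replace_zero (cs : List Char) :
    PySem.Chars.replace cs ['0'] [] = cs.filter (fun c => c != '0') := by
  rw [PySem.Chars.replace]
  simp [replace_go_spec cs.length cs [] le_rfl]

theorem binaryA_length (n : Nat) :
    (binaryA n).length = PySem.Int.bitLength (n : Int) := by
  induction n using Nat.strong_induction_on with
  | _ n ih =>
    rw [binaryA]
    by_cases h1 : 1 < n
    · rw [if_pos h1, List.length_append, ih (n / 2) (by omega),
        PySem.Int.bitLength_natCast (by omega : 0 < n)]
      have e0 : (PySem.Int.toStr ((0 : Nat) : Int)).toList.length = 1 := by decide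
      have e1 : (PySem.Int.toStr ((1 : Nat) : Int)).toList.length = 1 := by decide
      rcases Nat.mod_two_eq_zero_or_one n with h | h <;> rw [h] <;> omega
    · rw [if_neg h1]
      by_cases h0 : n = 1
      · subst h0; decide
      · have : n = 0 := by omega
        subst this; decide

theorem binaryA_ones (n : Nat) :
    ((binaryA n).filter (fun c => c != '0')).length = PySem.Int.bitCount (n : Int) := by
  induction n using Nat.strong_induction_on with
  | _ n ih =>
    rw [binaryA]
    by_cases h1 : 1 < n
    · rw [if_pos h1, List.filter_append, List.length_append, ih (n / 2) (by omega),
        PySem.Int.bitCount_natCast (by omega : 0 < n)]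
      have e0 : ((PySem.Int.toStr ((0 : Nat) : Int)).toList.filter (fun c => c != '0')).length = 0 := by decide
      have e1 : ((PySem.Int.toStr ((1 : Nat) : Int)).toList.filter (fun c => c != '0')).length = 1 := by decide
      rcases Nat.mod_two_eq_zero_or_one n with h | h <;> rw [h] <;> omega
    · rw [if_neg h1]
      by_cases h0 : n = 1
      · subst h0; decide
      · have : n = 0 := by omega
        subst this; decide

theorem bl_bc_le (n : Nat) :
    PySem.Int.bitLength (n : Int) + PySem.Int.bitCount (n : Int) ≤ n + 1 := by
  induction n using Nat.strong_induction_on with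
  | _ n ih =>
    by_cases h0 : n = 0
    · subst h0; decide
    · by_cases h1 : n = 1
      · subst h1; decide
      · rw [PySem.Int.bitLength_natCast (by omega : 0 < n),
          PySem.Int.bitCount_natCast (by omega : 0 < n)]
        have := ih (n / 2) (by omega)
        omega

def loopA (s : List Char) (a0 a1 : Int) : List Int :=
  if _h : 1 < s.length then
    loopA (binaryA (PySem.Chars.replace s ['0'] []).length) (a0 + 1)
      (a1 + ((s.length : Int) - ((PySem.Chars.replace s ['0'] []).length : Int)))
  else [a0, a1]
termination_by s.length + (s.filter (fun c => c != '0')).length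
decreasing_by
  rw [replace_zero, binaryA_length, binaryA_ones]
  have h1 := bl_bc_le ((s.filter (fun c => c != '0')).length)
  omega

def solution (s : String) : List Int := loopA s.toList 0 0

-- ===== PORT B =====

-- B's helper _solve(n): (steps, zeros removed) for the game on bin(n), by recursion on n.
def solveB (n : Nat) : Int × Int :=
  if _h : 1 < PySem.Int.bitLength (n : Int) then
    let p := solveB (PySem.Int.bitCount (n : Int))
    (p.1 + 1, p.2 + ((PySem.Int.bitLength (n : Int) : Int) - (PySem.Int.bitCount (n : Int) : Int)))
  else (0, 0)
termination_by n
decreasing_by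
  have h1 := bl_bc_le n
  omega

def solution_alt (s : String) : List Int :=
  let length := s.toList.length
  let ones := length - PySem.Str.count s "0"
  if length ≤ 1 then [0, 0]
  else
    let p := solveB ones
    [p.1 + 1, p.2 + ((length : Int) - (ones : Int))]

-- ===== PRECONDITION & SPEC =====
def Spec_solution (s : String) (out : List Int) : Prop := out = solution_alt s
instance (s : String) (out : List Int) : Decidable (Spec_solution s out) := by unfold Spec_solution; infer_instance

-- ===== CLAIM (what is proved, stated in full; the proofs are below) =====
def Claim_equal_solution : Prop := ∀ (s : String), Dom_solution s → Spec_solution s (solution s)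

-- ===== LEMMAS AND PROOFS =====

theorem count_go_nil (fuel n : Nat) : PySem.Chars.count.go ['0'] fuel [] n = n := by
  cases fuel
  · rw [PySem.Chars.count.go]
  · rw [PySem.Chars.count.go]; simp

theorem count_go_cons (fuel : Nat) (c : Char) (t : List Char) (n : Nat) :
    PySem.Chars.count.go ['0'] (fuel+1) (c :: t) n
      = if '0' = c then PySem.Chars.count.go ['0'] fuel t (n+1)
        else PySem.Chars.count.go ['0'] fuel t n := by
  rw [PySem.Chars.count.go]
  by_cases hc : '0' = c <;> simp [List.isPrefixOf, hc]

theorem count_go_spec (fuel : Nat) : ∀ (l : List Char) (acc : Nat), l.length ≤ fuel →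
    PySem.Chars.count.go ['0'] fuel l acc
      = acc + (l.filter (fun c => c == '0')).length := by
  induction fuel with
  | zero =>
    intro l acc h
    have hl : l = [] := List.length_eq_zero_iff.mp (by omega)
    subst hl
    simp [count_go_nil]
  | succ fuel ih =>
    intro l acc h
    cases l with
    | nil => simp [count_go_nil]
    | cons c t =>
      rw [count_go_cons]
      by_cases hc : '0' = c
      · rw [if_pos hc, ih t (acc + 1) (by simpa using h)]
        simp [← hc]
        omega
      · rw [if_neg hc, ih t acc (by simpa using h)]
        have hne : (c == '0') = false := by simpa using fun h => hc h.symm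
        simp [hne]

theorem count_zero (cs : List Char) :
    PySem.Chars.count (cs) ['0'] = (cs.filter (fun c => c == '0')).length := by
  rw [PySem.Chars.count]
  simp [count_go_spec cs.length cs 0 le_rfl]

theorem ones_eq (cs : List Char) :
    cs.length - PySem.Chars.count cs ['0'] = (cs.filter (fun c => c != '0')).length := by
  rw [count_zero]
  have h1 : (cs.filter (fun c => c == '0')).length + (cs.filter (fun c => c != '0')).length = cs.length := by
    induction cs with
    | nil => simp
    | cons c t ih => by_cases hc : c = '0' <;> simp [hc] <;> omega
  omega

theorem loopA_solve (n : Nat) : ∀ (s : List Char),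
    s.length + (s.filter (fun c => c != '0')).length ≤ n → ∀ (a0 a1 : Int),
    loopA s a0 a1 =
      if 1 < s.length then
        [a0 + 1 + (solveB ((s.filter (fun c => c != '0')).length)).1,
         a1 + ((s.length : Int) - (((s.filter (fun c => c != '0')).length : Int)))
            + (solveB ((s.filter (fun c => c != '0')).length)).2]
      else [a0, a1] := by
  induction n with
  | zero =>
    intro s h a0 a1
    have hs : s.length = 0 := by omega
    rw [loopA]
    simp [hs]
  | succ n ih =>
    intro s h a0 a1
    rw [loopA]
    by_cases hl : 1 < s.length
    · rw [dif_pos hl, if_pos hl, replace_zero]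
      set k := (s.filter (fun c => c != '0')).length with hk
      have hlen := binaryA_length k
      have hones := binaryA_ones k
      have hm := bl_bc_le k
      have hfl : k ≤ s.length := List.length_filter_le _ _
      rw [ih (binaryA k) (by rw [hlen, hones]; omega)]
      rw [hlen, hones]
      by_cases hb : 1 < PySem.Int.bitLength (k : Int)
      · rw [if_pos hb]
        conv_rhs => rw [solveB, dif_pos hb]
        simp only [List.cons.injEq, and_true]
        constructor <;> push_cast <;> ring
      · rw [if_neg hb]
        conv_rhs => rw [solveB, dif_neg hb]
        simp only [List.cons.injEq, and_true]
        constructor <;> ring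
    · rw [dif_neg hl, if_neg hl]

-- ===== VERDICT (by name: the statement is the Claim_ definition above) =====
theorem solution_spec : Claim_equal_solution := by
  intro s _
  unfold Spec_solution solution solution_alt
  dsimp only
  rw [PySem.Str.count_eq]
  have h0 : "0".toList = ['0'] := rfl
  rw [h0, ones_eq]
  rw [loopA_solve (s.toList.length + (s.toList.filter (fun c => c != '0')).length) s.toList le_rfl 0 0]
  by_cases hl : 1 < s.toList.length
  · rw [if_pos hl, if_neg (by omega)]
    simp only [List.cons.injEq, and_true]
    constructor <;> push_cast <;> ring
  · rw [if_neg hl, if_pos (by omega)]
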